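-- pv_equiv track=rewrite | github.com/alancast/LeetCodeProblems | python/medium/2616_minimize_max_difference_of_pairs.py | _count_pairs_diff_less_than_threshold
-- ===== SOURCE A (Python) =====
-- from typing import List
--
-- def _count_pairs_diff_less_than_threshold(threshold: int, nums: List[int]) -> int:
--     n = len(nums)
--
--     index = count = 0
--     while index < n - 1:
--         # If a valid pair is found, make sure to update index to skip both numbers.
--         if nums[index + 1] - nums[index] <= threshold:
--             count += 1
--             index += 1
--
--         index += 1
--
--     return count
-- ===== SOURCE B (Python) =====
-- from typing import List
--
-- def _count_pairs_diff_less_than_threshold(threshold: int, nums: List[int]) -> int: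
--     # Bottom-up DP over prefixes with a rolling pair of variables:
--     # best_prev = dp[i-1], best = dp[i]; dp[i] = max(dp[i-1], dp[i-2] + edge).
--     best_prev = best = 0
--     for a, b in zip(nums, nums[1:]):
--         best_prev, best = best, max(best, best_prev + (1 if b - a <= threshold else 0))
--     return best
-- ===== Notes on version B (the rewrite author's own statement) =====
-- stated objective: alternative
-- what changed: Replaced the greedy index-skipping while loop with a bottom-up dynamic-programming recurrence dp[i]=max(dp[i-1],dp[i-2]+edge) over adjacent pairs, kept as a rolling pair of variables.
import Mathlib
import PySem

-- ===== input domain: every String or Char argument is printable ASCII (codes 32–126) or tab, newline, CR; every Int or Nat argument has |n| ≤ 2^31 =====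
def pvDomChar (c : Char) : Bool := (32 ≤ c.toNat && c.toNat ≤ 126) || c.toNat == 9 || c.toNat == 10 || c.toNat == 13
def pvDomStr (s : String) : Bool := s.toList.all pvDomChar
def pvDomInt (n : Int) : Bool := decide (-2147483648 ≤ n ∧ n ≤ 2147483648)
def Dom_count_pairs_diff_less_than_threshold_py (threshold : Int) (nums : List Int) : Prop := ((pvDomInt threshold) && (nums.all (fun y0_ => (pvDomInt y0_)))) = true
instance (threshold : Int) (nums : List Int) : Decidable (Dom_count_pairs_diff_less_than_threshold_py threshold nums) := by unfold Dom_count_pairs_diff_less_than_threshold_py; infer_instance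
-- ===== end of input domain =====

-- B replaces A's greedy index-skipping scan by a bottom-up DP recurrence with rolling state (alternative decomposition, same cost).

-- ===== PORT A =====
-- A's while loop; index advances by 2 when a pair is taken, else by 1.
-- nums[index]/nums[index+1] are always in range under the loop guard, so List.getD is exact here.
def pvALoop (threshold : Int) (nums : List Int) (index : Nat) (count : Int) : Int :=
  if index < nums.length - 1 then
    if nums.getD (index + 1) 0 - nums.getD index 0 ≤ threshold then
      pvALoop threshold nums (index + 2) (count + 1)
    else
      pvALoop threshold nums (index + 1) count
  else count
termination_by nums.length - index
decreasing_by all_goals omega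

def count_pairs_diff_less_than_threshold_py (threshold : Int) (nums : List Int) : Int :=
  pvALoop threshold nums 0 0

-- ===== PORT B =====
-- Source B: fold over zip(nums, nums[1:]) with rolling state (dp[i-1], dp[i]).
def count_pairs_diff_less_than_threshold_py_alt (threshold : Int) (nums : List Int) : Int :=
  (List.foldl
    (fun (s : Int × Int) (p : Int × Int) =>
      (s.2, max s.2 (s.1 + (if p.2 - p.1 ≤ threshold then (1 : Int) else 0))))
    (0, 0) (nums.zip (nums.drop 1))).2

-- ===== PRECONDITION & SPEC =====
def Spec_count_pairs_diff_less_than_threshold_py (threshold : Int) (nums : List Int) (out : Int) : Prop := out = count_pairs_diff_less_than_threshold_py_alt threshold nums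
instance (threshold : Int) (nums : List Int) (out : Int) : Decidable (Spec_count_pairs_diff_less_than_threshold_py threshold nums out) := by unfold Spec_count_pairs_diff_less_than_threshold_py; infer_instance

-- ===== CLAIM (what is proved, stated in full; the proofs are below) =====
def Claim_equal_count_pairs_diff_less_than_threshold_py : Prop := ∀ (threshold : Int) (nums : List Int), Dom_count_pairs_diff_less_than_threshold_py threshold nums → Spec_count_pairs_diff_less_than_threshold_py threshold nums (count_pairs_diff_less_than_threshold_py threshold nums)

-- ===== LEMMAS AND PROOFS =====

-- Maximum matching on the path graph (suffix recurrence).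
def pvM (t : Int) : List Int → Int
  | a :: b :: r => max (pvM t (b :: r)) ((if b - a ≤ t then (1 : Int) else 0) + pvM t r)
  | _ => 0
termination_by xs => xs.length

-- Greedy leftmost matching, structurally.
def pvG (t : Int) : List Int → Int
  | a :: b :: r => if b - a ≤ t then 1 + pvG t r else pvG t (b :: r)
  | _ => 0
termination_by xs => xs.length

lemma pvM_mono (t x : Int) : ∀ r : List Int, pvM t r ≤ pvM t (x :: r) := by
  intro r
  match r with
  | [] => simp [pvM]
  | c :: s => rw [pvM]; exact le_max_left _ _

lemma pvM_cons_le (t : Int) : ∀ r : List Int, ∀ x : Int, pvM t (x :: r) ≤ 1 + pvM t r := by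
  intro r x
  match r with
  | [] => simp [pvM]
  | c :: s =>
    rw [pvM]
    have := pvM_mono t c s
    split <;> omega

lemma pvG_eq_pvM (t : Int) : ∀ n (xs : List Int), xs.length ≤ n → pvG t xs = pvM t xs := by
  intro n
  induction n with
  | zero => intro xs h; interval_cases h' : xs.length <;> simp_all [pvG, pvM, List.length_eq_zero_iff]
  | succ n ih =>
    intro xs h
    match xs with
    | [] => simp [pvG, pvM]
    | [a] => simp [pvG, pvM]
    | a :: b :: r =>
      rw [pvG, pvM]
      simp only [List.length_cons] at h
      by_cases hc : b - a ≤ t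
      · have hr : pvG t r = pvM t r := ih r (by omega)
        have h1 : pvM t (b :: r) ≤ 1 + pvM t r := pvM_cons_le t r b
        rw [if_pos hc, if_pos hc, hr]
        omega
      · have hr : pvG t (b :: r) = pvM t (b :: r) := ih (b :: r) (by simp only [List.length_cons]; omega)
        have h2 : pvM t r ≤ pvM t (b :: r) := pvM_mono t b r
        rw [if_neg hc, if_neg hc, hr]
        omega

-- ---- B-side: the forward DP fold computes pvM. ----
lemma foldB_eq (t : Int) : ∀ (xs : List Int) (prev p q : Int), p ≤ q →
    (List.foldl
      (fun (s : Int × Int) (pr : Int × Int) =>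
        (s.2, max s.2 (s.1 + (if pr.2 - pr.1 ≤ t then (1 : Int) else 0))))
      (p, q) ((prev :: xs).zip xs)).2
    = max (q + pvM t xs) (p + pvM t (prev :: xs)) := by
  intro xs
  induction xs with
  | nil => intro prev p q hpq; simp [pvM]; omega
  | cons x xs' ih =>
    intro prev p q hpq
    have hstep : (prev :: x :: xs').zip (x :: xs') = (prev, x) :: ((x :: xs').zip xs') := by
      simp [List.zip]
    rw [hstep, List.foldl_cons]
    have hle : q ≤ max q (p + (if x - prev ≤ t then (1 : Int) else 0)) := le_max_left _ _
    rw [ih x q (max q (p + (if x - prev ≤ t then (1 : Int) else 0))) hle]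
    have hM : pvM t (prev :: x :: xs') =
        max (pvM t (x :: xs')) ((if x - prev ≤ t then (1 : Int) else 0) + pvM t xs') := by
      rw [pvM]
    rw [hM]
    have hmono : pvM t xs' ≤ pvM t (x :: xs') := pvM_mono t x xs'
    split <;> omega

lemma altB_eq_pvM (t : Int) (nums : List Int) :
    count_pairs_diff_less_than_threshold_py_alt t nums = pvM t nums := by
  match nums with
  | [] => simp [count_pairs_diff_less_than_threshold_py_alt, pvM]
  | a :: xs =>
    unfold count_pairs_diff_less_than_threshold_py_alt
    have hd : (a :: xs).drop 1 = xs := by simp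
    rw [hd, foldB_eq t xs a 0 0 le_rfl]
    have := pvM_mono t a xs
    omega

-- ---- A-side: the index loop computes pvG on the remaining suffix. ----
lemma aLoop_eq (t : Int) (nums : List Int) :
    ∀ (fuel i : Nat) (c : Int), nums.length - i ≤ fuel →
      pvALoop t nums i c = c + pvG t (nums.drop i) := by
  intro fuel
  induction fuel with
  | zero =>
    intro i c h
    rw [pvALoop]
    have hi : nums.length ≤ i := by omega
    rw [if_neg (by omega)]
    rw [List.drop_eq_nil_of_le hi]
    simp [pvG]
  | succ n ih =>
    intro i c h
    rw [pvALoop]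
    by_cases hg : i < nums.length - 1
    · rw [if_pos hg]
      have hi : i < nums.length := by omega
      have hi1 : i + 1 < nums.length := by omega
      have hdi : nums.drop i = nums[i] :: nums.drop (i + 1) := List.drop_eq_getElem_cons hi
      have hdi1 : nums.drop (i + 1) = nums[i+1] :: nums.drop (i + 2) := List.drop_eq_getElem_cons hi1
      have hgd : nums.getD i 0 = nums[i] := List.getD_eq_getElem nums 0 hi
      have hgd1 : nums.getD (i+1) 0 = nums[i+1] := List.getD_eq_getElem nums 0 hi1
      rw [hgd, hgd1, hdi, hdi1, pvG]
      by_cases hc : nums[i+1] - nums[i] ≤ t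
      · rw [if_pos hc, if_pos hc, ih (i + 2) (c + 1) (by omega)]
        ring
      · rw [if_neg hc, if_neg hc, ih (i + 1) c (by omega), hdi1]
    · rw [if_neg hg]
      have : nums.length ≤ i + 1 := by omega
      match hnd : nums.drop i with
      | [] => simp [pvG]
      | [x] => simp [pvG]
      | x :: y :: r =>
        exfalso
        have := List.length_drop (l := nums) (i := i)
        rw [hnd] at this
        simp at this
        omega

-- ===== VERDICT (by name: the statement is the Claim_ definition above) =====
theorem count_pairs_diff_less_than_threshold_py_spec : Claim_equal_count_pairs_diff_less_than_threshold_py := by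
  intro t nums _
  unfold Spec_count_pairs_diff_less_than_threshold_py
  rw [count_pairs_diff_less_than_threshold_py, aLoop_eq t nums nums.length 0 0 (by omega),
    List.drop_zero, zero_add, altB_eq_pvM, pvG_eq_pvM t nums.length nums le_rfl]
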